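-- pv_equiv track=rewrite | github.com/RahAmudha/CS | Lethal_Thief/Level/generation.py | bitmap_to_level
-- ===== SOURCE A (Python) =====
-- def bitmap_to_level(bitmap):
--     size = len(bitmap)
--     height = size * 2 + 1
--     width = 2 * height - 1
--     f = [[' ' for _ in range(width)] for _ in range(height)]
--     for row in range(size):
--         for col in range(size):
--             if bitmap[row][col] == 0:
--                 if row < size - 1 and bitmap[row+1][col] == 1:
--                     f[(row+1)*2][4*col+1: 4*col+4] = '═══'
--                 if row > 0 and bitmap[row-1][col] == 1:
--                     f[row*2][4*col+1: 4*col+4] = '═══'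
--                 if col < size - 1 and bitmap[row][col+1] == 1:
--                     f[row*2+1][4*(col+1)] = '║'
--                 if col > 0 and bitmap[row][col-1] == 1:
--                     f[row*2+1][4*(col)] = '║'
--
--     return f
-- ===== SOURCE B (Python) =====
-- def bitmap_to_level(bitmap):
--     size = len(bitmap)
--     height = size * 2 + 1
--     width = 2 * height - 1
--     f = [[' ' for _ in range(width)] for _ in range(height)]
--     # vertical walls: one write per horizontal adjacency (edge view, XOR of the two cells)
--     for row in range(size):
--         for col in range(size - 1):
--             a, b = bitmap[row][col], bitmap[row][col + 1]
--             if (a == 0 and b == 1) or (a == 1 and b == 0):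
--                 f[row * 2 + 1][4 * (col + 1)] = '║'
--     # horizontal walls: one write per vertical adjacency
--     for row in range(size - 1):
--         for col in range(size):
--             a, b = bitmap[row][col], bitmap[row + 1][col]
--             if (a == 0 and b == 1) or (a == 1 and b == 0):
--                 f[(row + 1) * 2][4 * col + 1: 4 * col + 4] = '═══'
--     return f
-- ===== Notes on version B (the rewrite author's own statement) =====
-- stated objective: alternative
-- what changed: B iterates over the edges between adjacent cells (one symmetric XOR test per edge, each wall written once) instead of A's per-cell loop that tests all four neighbors and writes each wall from both sides.
import Mathlib
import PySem

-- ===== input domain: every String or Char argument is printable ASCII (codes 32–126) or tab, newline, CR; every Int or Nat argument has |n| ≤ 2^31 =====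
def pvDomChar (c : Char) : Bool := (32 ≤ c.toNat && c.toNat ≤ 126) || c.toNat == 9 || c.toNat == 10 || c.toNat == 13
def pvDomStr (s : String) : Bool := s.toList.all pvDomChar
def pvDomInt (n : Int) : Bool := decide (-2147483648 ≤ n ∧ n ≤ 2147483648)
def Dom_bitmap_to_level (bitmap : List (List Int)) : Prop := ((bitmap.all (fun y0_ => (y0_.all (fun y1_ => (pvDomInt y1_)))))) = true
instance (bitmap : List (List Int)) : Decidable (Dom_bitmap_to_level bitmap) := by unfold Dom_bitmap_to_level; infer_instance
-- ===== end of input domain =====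

-- B re-renders the maze from the edge view (one symmetric XOR test per adjacency, each wall
-- written once) instead of A's per-cell view testing all four neighbors; alternative decomposition,
-- same O(size^2) cost.


-- ===== PORT A =====
-- shared primitive statements of both Pythons:
-- bitmap[r][c]  (in range whenever Pre_ holds; the default 2 is never seen there)
def bmGet (bitmap : List (List Int)) (r c : Nat) : Int := (bitmap.getD r []).getD c 2
-- f[i][j] = '║'
def setV (f : List (List String)) (i j : Nat) : List (List String) :=
  f.set i ((f.getD i []).set j "║")
-- f[i][j:j+3] = '═══'
def setH (f : List (List String)) (i j : Nat) : List (List String) :=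
  f.set i ((((f.getD i []).set j "═").set (j+1) "═").set (j+2) "═")

def bitmap_to_level (bitmap : List (List Int)) : List (List String) :=
  let size := bitmap.length
  let height := size * 2 + 1
  let width := 2 * height - 1
  let f0 := List.replicate height (List.replicate width " ")
  (List.range size).foldl (fun f row =>
    (List.range size).foldl (fun f col =>
      if bmGet bitmap row col = 0 then
        let f1 := if row < size - 1 ∧ bmGet bitmap (row+1) col = 1 then setH f ((row+1)*2) (4*col+1) else f
        let f2 := if 0 < row ∧ bmGet bitmap (row-1) col = 1 then setH f1 (row*2) (4*col+1) else f1
        let f3 := if col < size - 1 ∧ bmGet bitmap row (col+1) = 1 then setV f2 (row*2+1) (4*(col+1)) else f2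
        if 0 < col ∧ bmGet bitmap row (col-1) = 1 then setV f3 (row*2+1) (4*col) else f3
      else f) f) f0

-- ===== PORT B =====
-- (a == 0 and b == 1) or (a == 1 and b == 0)
def xorWall (a b : Int) : Bool := (a == 0 && b == 1) || (a == 1 && b == 0)

def bitmap_to_level_alt (bitmap : List (List Int)) : List (List String) :=
  let size := bitmap.length
  let height := size * 2 + 1
  let width := 2 * height - 1
  let f0 := List.replicate height (List.replicate width " ")
  let fV := (List.range size).foldl (fun f row =>
    (List.range (size - 1)).foldl (fun f col =>
      if xorWall (bmGet bitmap row col) (bmGet bitmap row (col+1)) then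
        setV f (row*2+1) (4*(col+1))
      else f) f) f0
  (List.range (size - 1)).foldl (fun f row =>
    (List.range size).foldl (fun f col =>
      if xorWall (bmGet bitmap row col) (bmGet bitmap (row+1) col) then
        setH f ((row+1)*2) (4*col+1)
      else f) f) fV

-- ===== PRECONDITION & SPEC =====
-- Pre_ excludes exactly the ragged bitmaps (some row shorter than len(bitmap)), on which A raises IndexError.
def Pre_bitmap_to_level (bitmap : List (List Int)) : Prop :=
  ∀ r ∈ bitmap, bitmap.length ≤ r.length
instance (bitmap : List (List Int)) : Decidable (Pre_bitmap_to_level bitmap) := by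
  unfold Pre_bitmap_to_level; infer_instance

def pvWitness_bitmap_to_level : List (List Int) := [[0, 1], [1, 0]]

def Spec_bitmap_to_level (bitmap : List (List Int)) (out : List (List String)) : Prop := out = bitmap_to_level_alt bitmap
instance (bitmap : List (List Int)) (out : List (List String)) : Decidable (Spec_bitmap_to_level bitmap out) := by unfold Spec_bitmap_to_level; infer_instance

-- ===== CLAIM (what is proved, stated in full; the proofs are below) =====
def Claim_equal_bitmap_to_level : Prop := ∀ (bitmap : List (List Int)), Dom_bitmap_to_level bitmap → Pre_bitmap_to_level bitmap → Spec_bitmap_to_level bitmap (bitmap_to_level bitmap)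


-- ===== LEMMAS AND PROOFS =====

-- the character a wall write puts at grid position (i, j) depends only on the position
def chr (i _j : Nat) : String := if i % 2 = 1 then "║" else "═"

def setCell (f : List (List String)) (i j : Nat) : List (List String) :=
  f.set i ((f.getD i []).set j (chr i j))

def applyW (f : List (List String)) (ps : List (Nat × Nat)) : List (List String) :=
  ps.foldl (fun f p => setCell f p.1 p.2) f

def Rect (f : List (List String)) (h w : Nat) : Prop :=
  f.length = h ∧ ∀ r ∈ f, r.length = w

def cell (f : List (List String)) (i j : Nat) : String := ((f.getD i []).getD j " ")

-- write lists of the two ports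
def cellPosA (bitmap : List (List Int)) (row col : Nat) : List (Nat × Nat) :=
  if bmGet bitmap row col = 0 then
    (if row < bitmap.length - 1 ∧ bmGet bitmap (row+1) col = 1 then
        [((row+1)*2, 4*col+1), ((row+1)*2, 4*col+2), ((row+1)*2, 4*col+3)] else [])
    ++ (if 0 < row ∧ bmGet bitmap (row-1) col = 1 then
        [(row*2, 4*col+1), (row*2, 4*col+2), (row*2, 4*col+3)] else [])
    ++ (if col < bitmap.length - 1 ∧ bmGet bitmap row (col+1) = 1 then
        [(row*2+1, 4*(col+1))] else [])
    ++ (if 0 < col ∧ bmGet bitmap row (col-1) = 1 then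
        [(row*2+1, 4*col)] else [])
  else []

def psA (bitmap : List (List Int)) : List (Nat × Nat) :=
  (List.range bitmap.length).flatMap fun row =>
    (List.range bitmap.length).flatMap fun col => cellPosA bitmap row col

def psB (bitmap : List (List Int)) : List (Nat × Nat) :=
  ((List.range bitmap.length).flatMap fun row =>
    (List.range (bitmap.length - 1)).flatMap fun col =>
      if xorWall (bmGet bitmap row col) (bmGet bitmap row (col+1)) then
        [(row*2+1, 4*(col+1))] else [])
  ++ ((List.range (bitmap.length - 1)).flatMap fun row =>
    (List.range bitmap.length).flatMap fun col =>
      if xorWall (bmGet bitmap row col) (bmGet bitmap (row+1) col) then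
        [((row+1)*2, 4*col+1), ((row+1)*2, 4*col+2), ((row+1)*2, 4*col+3)] else [])

theorem applyW_nil (f : List (List String)) : applyW f [] = f := rfl

theorem applyW_append (f : List (List String)) (ps qs : List (Nat × Nat)) :
    applyW f (ps ++ qs) = applyW (applyW f ps) qs := List.foldl_append ..

theorem applyW_ite (f : List (List String)) (c : Prop) [Decidable c] (l : List (Nat × Nat)) :
    applyW f (if c then l else []) = if c then applyW f l else f := by
  split <;> rfl

theorem setV_eq (f : List (List String)) (i j : Nat) (h : i % 2 = 1) :
    setV f i j = applyW f [(i, j)] := by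
  simp [setV, setCell, applyW, chr, h]

theorem setH_eq (f : List (List String)) (i j : Nat) (h : i % 2 = 0) :
    setH f i j = applyW f [(i, j), (i, j+1), (i, j+2)] := by
  rcases Nat.lt_or_ge i f.length with hi | hi
  · simp [setH, setCell, applyW, chr, h, List.getD_eq_getElem?_getD,
      hi, List.set_set]
  · simp [setH, setCell, applyW, List.set_eq_of_length_le hi]

theorem foldl_gen (l : List Nat) (g : List (List String) → Nat → List (List String))
    (w : Nat → List (Nat × Nat)) (f0 : List (List String))
    (hg : ∀ f x, g f x = applyW f (w x)) :
    l.foldl g f0 = applyW f0 (l.flatMap w) := by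
  induction l generalizing f0 with
  | nil => rfl
  | cons a l ih => simp [List.foldl_cons, hg, applyW_append, ih]

theorem stepA (bitmap : List (List Int)) (f : List (List String)) (row col : Nat) :
    (if bmGet bitmap row col = 0 then
        let f1 := if row < bitmap.length - 1 ∧ bmGet bitmap (row+1) col = 1 then setH f ((row+1)*2) (4*col+1) else f
        let f2 := if 0 < row ∧ bmGet bitmap (row-1) col = 1 then setH f1 (row*2) (4*col+1) else f1
        let f3 := if col < bitmap.length - 1 ∧ bmGet bitmap row (col+1) = 1 then setV f2 (row*2+1) (4*(col+1)) else f2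
        if 0 < col ∧ bmGet bitmap row (col-1) = 1 then setV f3 (row*2+1) (4*col) else f3
      else f) = applyW f (cellPosA bitmap row col) := by
  have h1 : ((row+1)*2) % 2 = 0 := by omega
  have h2 : (row*2) % 2 = 0 := by omega
  have h3 : (row*2+1) % 2 = 1 := by omega
  unfold cellPosA
  split_ifs <;>
    simp_all [setH_eq, setV_eq, applyW,
      show ∀ c : Nat, 4*c+1+1 = 4*c+2 from fun c => rfl,
      show ∀ c : Nat, 4*c+1+2 = 4*c+3 from fun c => rfl]

theorem portA_char (bitmap : List (List Int)) :
    bitmap_to_level bitmap =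
      applyW (List.replicate (bitmap.length * 2 + 1)
        (List.replicate (2 * (bitmap.length * 2 + 1) - 1) " ")) (psA bitmap) := by
  unfold bitmap_to_level psA
  exact foldl_gen _ _ _ _ (fun f row => foldl_gen _ _ _ _ (fun f col => stepA bitmap f row col))

theorem portB_char (bitmap : List (List Int)) :
    bitmap_to_level_alt bitmap =
      applyW (List.replicate (bitmap.length * 2 + 1)
        (List.replicate (2 * (bitmap.length * 2 + 1) - 1) " ")) (psB bitmap) := by
  have hV : ∀ (f : List (List String)) (row col : Nat),
      (if xorWall (bmGet bitmap row col) (bmGet bitmap row (col+1)) then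
        setV f (row*2+1) (4*(col+1)) else f)
      = applyW f (if xorWall (bmGet bitmap row col) (bmGet bitmap row (col+1)) then
          [(row*2+1, 4*(col+1))] else []) := by
    intro f row col
    rw [applyW_ite]
    split <;> [exact setV_eq f _ _ (by omega); rfl]
  have hH : ∀ (f : List (List String)) (row col : Nat),
      (if xorWall (bmGet bitmap row col) (bmGet bitmap (row+1) col) then
        setH f ((row+1)*2) (4*col+1) else f)
      = applyW f (if xorWall (bmGet bitmap row col) (bmGet bitmap (row+1) col) then
          [((row+1)*2, 4*col+1), ((row+1)*2, 4*col+2), ((row+1)*2, 4*col+3)] else []) := by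
    intro f row col
    rw [applyW_ite]
    split
    · exact setH_eq f _ _ (by omega)
    · rfl
  have hVfold : ∀ f0 : List (List String),
      (List.range bitmap.length).foldl (fun f row =>
        (List.range (bitmap.length - 1)).foldl (fun f col =>
          if xorWall (bmGet bitmap row col) (bmGet bitmap row (col+1)) then
            setV f (row*2+1) (4*(col+1)) else f) f) f0
      = applyW f0 ((List.range bitmap.length).flatMap fun row =>
          (List.range (bitmap.length - 1)).flatMap fun col =>
            if xorWall (bmGet bitmap row col) (bmGet bitmap row (col+1)) then
              [(row*2+1, 4*(col+1))] else []) :=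
    fun f0 => foldl_gen _ _ _ f0 (fun f row => foldl_gen _ _ _ f (fun f' col => hV f' row col))
  have hHfold : ∀ f0 : List (List String),
      (List.range (bitmap.length - 1)).foldl (fun f row =>
        (List.range bitmap.length).foldl (fun f col =>
          if xorWall (bmGet bitmap row col) (bmGet bitmap (row+1) col) then
            setH f ((row+1)*2) (4*col+1) else f) f) f0
      = applyW f0 ((List.range (bitmap.length - 1)).flatMap fun row =>
          (List.range bitmap.length).flatMap fun col =>
            if xorWall (bmGet bitmap row col) (bmGet bitmap (row+1) col) then
              [((row+1)*2, 4*col+1), ((row+1)*2, 4*col+2), ((row+1)*2, 4*col+3)] else []) :=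
    fun f0 => foldl_gen _ _ _ f0 (fun f row => foldl_gen _ _ _ f (fun f' col => hH f' row col))
  calc bitmap_to_level_alt bitmap
      = (List.range (bitmap.length - 1)).foldl (fun f row =>
          (List.range bitmap.length).foldl (fun f col =>
            if xorWall (bmGet bitmap row col) (bmGet bitmap (row+1) col) then
              setH f ((row+1)*2) (4*col+1) else f) f)
          ((List.range bitmap.length).foldl (fun f row =>
            (List.range (bitmap.length - 1)).foldl (fun f col =>
              if xorWall (bmGet bitmap row col) (bmGet bitmap row (col+1)) then
                setV f (row*2+1) (4*(col+1)) else f) f)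
            (List.replicate (bitmap.length * 2 + 1)
              (List.replicate (2 * (bitmap.length * 2 + 1) - 1) " "))) := rfl
    _ = _ := by rw [hHfold, hVfold, psB, ← applyW_append]

theorem getD_set_self {α : Type} (d : α) (l : List α) (i : Nat) (a : α) (h : i < l.length) :
    (l.set i a).getD i d = a := by
  simp [List.getD_eq_getElem?_getD, List.getElem?_set_self h]

theorem getD_set_ne {α : Type} (d : α) (l : List α) {i j : Nat} (a : α) (h : i ≠ j) :
    (l.set i a).getD j d = l.getD j d := by
  simp [List.getD_eq_getElem?_getD, List.getElem?_set_ne h]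

theorem rect_setCell {f : List (List String)} {h w : Nat} (hf : Rect f h w) (i j : Nat) :
    Rect (setCell f i j) h w := by
  obtain ⟨hlen, hrow⟩ := hf
  unfold setCell
  rcases Nat.lt_or_ge i f.length with hi | hi
  · refine ⟨by simp [hlen], ?_⟩
    intro r hr
    rcases List.mem_or_eq_of_mem_set hr with hr' | rfl
    · exact hrow r hr'
    · rw [List.length_set, List.getD_eq_getElem?_getD, List.getElem?_eq_getElem hi]
      exact hrow _ (List.getElem_mem hi)
  · rw [List.set_eq_of_length_le hi]
    exact ⟨hlen, hrow⟩

theorem rect_applyW {f : List (List String)} {h w : Nat} (hf : Rect f h w)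
    (ps : List (Nat × Nat)) : Rect (applyW f ps) h w := by
  induction ps generalizing f with
  | nil => exact hf
  | cons p ps ih => exact ih (rect_setCell hf p.1 p.2)

theorem cell_setCell {f : List (List String)} {h w : Nat} (hf : Rect f h w)
    {a b : Nat} (ha : a < h) (hb : b < w) (i j : Nat) :
    cell (setCell f a b) i j = if a = i ∧ b = j then chr i j else cell f i j := by
  obtain ⟨hlen, hrow⟩ := hf
  have halen : a < f.length := by omega
  have hrlen : (f.getD a []).length = w := by
    rw [List.getD_eq_getElem?_getD, List.getElem?_eq_getElem halen]
    exact hrow _ (List.getElem_mem halen)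
  by_cases hia : a = i
  · subst hia
    unfold cell setCell
    rw [getD_set_self _ _ _ _ halen]
    by_cases hjb : b = j
    · subst hjb
      rw [getD_set_self _ _ _ _ (by omega)]
      simp
    · rw [getD_set_ne _ _ _ hjb]
      simp [hjb]
  · unfold cell setCell
    rw [getD_set_ne _ _ _ hia]
    simp [hia]

theorem cell_applyW {f : List (List String)} {h w : Nat} (hf : Rect f h w)
    {ps : List (Nat × Nat)} (hps : ∀ p ∈ ps, p.1 < h ∧ p.2 < w) (i j : Nat) :
    cell (applyW f ps) i j = if (i, j) ∈ ps then chr i j else cell f i j := by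
  induction ps generalizing f with
  | nil => simp [applyW_nil]
  | cons p ps ih =>
    have hp := hps p (by simp)
    rw [show applyW f (p :: ps) = applyW (setCell f p.1 p.2) ps from rfl,
        ih (rect_setCell hf p.1 p.2) (fun q hq => hps q (List.mem_cons_of_mem _ hq)),
        cell_setCell hf hp.1 hp.2]
    by_cases hmem : (i, j) ∈ ps
    · simp [hmem]
    · by_cases hpe : p.1 = i ∧ p.2 = j
      · have hp' : p = (i, j) := Prod.ext hpe.1 hpe.2
        simp [hp']
      · have hne : (i, j) ≠ p := fun hq => hpe (by rw [← hq]; exact ⟨rfl, rfl⟩)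
        simp [List.mem_cons, hmem, hpe, hne]

theorem mem_ite_nil {α : Type} (a : α) (c : Prop) [Decidable c] (l : List α) :
    (a ∈ if c then l else []) ↔ c ∧ a ∈ l := by
  split <;> simp_all

theorem xorWall_iff (a b : Int) :
    xorWall a b = true ↔ (a = 0 ∧ b = 1) ∨ (a = 1 ∧ b = 0) := by
  simp [xorWall]

theorem mem_psA_iff_psB (bitmap : List (List Int)) (i j : Nat) :
    (i, j) ∈ psA bitmap ↔ (i, j) ∈ psB bitmap := by
  simp only [psA, psB, cellPosA, List.mem_append, List.mem_flatMap, List.mem_range,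
    mem_ite_nil, xorWall_iff, List.mem_cons, List.not_mem_nil, Prod.mk.injEq]
  constructor
  · rintro ⟨r, hr, c, hc, h0,
      (((⟨⟨hrow, h1⟩, hp⟩ | ⟨⟨hrow, h1⟩, hp⟩) | ⟨⟨hcol, h1⟩, hp⟩) | ⟨⟨hcol, h1⟩, hp⟩)⟩
    · -- wall below cell (r,c): vertical adjacency (r, c)
      exact Or.inr ⟨r, hrow, c, hc, Or.inl ⟨h0, h1⟩, hp⟩
    · -- wall above cell (r,c): vertical adjacency (r-1, c)
      have e : r - 1 + 1 = r := by omega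
      refine Or.inr ⟨r - 1, by omega, c, hc, Or.inr ⟨h1, ?_⟩, ?_⟩
      · rw [e]; exact h0
      · rw [e]; exact hp
    · -- wall right of cell (r,c): horizontal adjacency (r, c)
      exact Or.inl ⟨r, hr, c, hcol, Or.inl ⟨h0, h1⟩, hp⟩
    · -- wall left of cell (r,c): horizontal adjacency (r, c-1)
      have e : c - 1 + 1 = c := by omega
      refine Or.inl ⟨r, hr, c - 1, by omega, Or.inr ⟨h1, ?_⟩, ?_⟩
      · rw [e]; exact h0
      · rw [e]; exact hp
  · rintro (⟨r, hr, c, hc, hx, hp⟩ | ⟨r, hr, c, hc, hx, hp⟩)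
    · rcases hx with ⟨h0, h1⟩ | ⟨h1, h0⟩
      · -- cell (r,c) is 0, its right neighbor 1
        exact ⟨r, hr, c, by omega, h0, Or.inl (Or.inr ⟨⟨hc, h1⟩, hp⟩)⟩
      · -- cell (r,c+1) is 0, its left neighbor 1
        exact ⟨r, hr, c + 1, by omega, h0, Or.inr ⟨⟨by omega, h1⟩, hp⟩⟩
    · rcases hx with ⟨h0, h1⟩ | ⟨h1, h0⟩
      · -- cell (r,c) is 0, the cell below it 1
        exact ⟨r, by omega, c, hc, h0, Or.inl (Or.inl (Or.inl ⟨⟨hr, h1⟩, hp⟩))⟩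
      · -- cell (r+1,c) is 0, the cell above it 1
        exact ⟨r + 1, by omega, c, hc, h0, Or.inl (Or.inl (Or.inr ⟨⟨by omega, h1⟩, hp⟩))⟩

theorem bounds_psA (bitmap : List (List Int)) :
    ∀ p ∈ psA bitmap, p.1 < bitmap.length * 2 + 1 ∧ p.2 < 2 * (bitmap.length * 2 + 1) - 1 := by
  rintro ⟨i, j⟩ hm
  simp only [psA, cellPosA, List.mem_flatMap, List.mem_range, List.mem_append, mem_ite_nil,
    List.mem_cons, List.not_mem_nil, Prod.mk.injEq] at hm
  obtain ⟨r, hr, c, hc, -, hmem⟩ := hm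
  rcases hmem with (((⟨⟨h, -⟩, hp⟩ | ⟨⟨h, -⟩, hp⟩) | ⟨⟨h, -⟩, hp⟩) | ⟨⟨h, -⟩, hp⟩) <;>
    simp only [or_false] at hp
  · rcases hp with ⟨e1, e2⟩ | ⟨e1, e2⟩ | ⟨e1, e2⟩ <;> omega
  · rcases hp with ⟨e1, e2⟩ | ⟨e1, e2⟩ | ⟨e1, e2⟩ <;> omega
  · obtain ⟨e1, e2⟩ := hp; omega
  · obtain ⟨e1, e2⟩ := hp; omega

theorem bounds_psB (bitmap : List (List Int)) :
    ∀ p ∈ psB bitmap, p.1 < bitmap.length * 2 + 1 ∧ p.2 < 2 * (bitmap.length * 2 + 1) - 1 := by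
  rintro ⟨i, j⟩ hm
  simp only [psB, List.mem_append, List.mem_flatMap, List.mem_range, mem_ite_nil,
    List.mem_cons, List.not_mem_nil, Prod.mk.injEq] at hm
  rcases hm with ⟨r, hr, c, hc, -, hp⟩ | ⟨r, hr, c, hc, -, hp⟩ <;>
    simp only [or_false] at hp
  · obtain ⟨e1, e2⟩ := hp; omega
  · rcases hp with ⟨e1, e2⟩ | ⟨e1, e2⟩ | ⟨e1, e2⟩ <;> omega

theorem rect_blank (h w : Nat) :
    Rect (List.replicate h (List.replicate w " ")) h w := by
  refine ⟨by simp, ?_⟩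
  intro r hr
  rw [List.eq_of_mem_replicate hr]
  simp

theorem grid_ext {f g : List (List String)} {h w : Nat}
    (hf : Rect f h w) (hg : Rect g h w)
    (hc : ∀ i < h, ∀ j < w, cell f i j = cell g i j) : f = g := by
  obtain ⟨hfl, hfr⟩ := hf
  obtain ⟨hgl, hgr⟩ := hg
  apply List.ext_getElem (by omega)
  intro i hi hi'
  have hif : i < h := by omega
  have hrf : f[i].length = w := hfr _ (List.getElem_mem hi)
  have hrg : g[i].length = w := hgr _ (List.getElem_mem hi')
  apply List.ext_getElem (by omega)
  intro j hj hj'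
  have hjw : j < w := by omega
  have := hc i hif j hjw
  simpa [cell, List.getD_eq_getElem?_getD, List.getElem?_eq_getElem hi,
    List.getElem?_eq_getElem hi', List.getElem?_eq_getElem hj,
    List.getElem?_eq_getElem hj'] using this

-- ===== VERDICT (by name: the statement is the Claim_ definition above) =====
theorem bitmap_to_level_spec : Claim_equal_bitmap_to_level := by
  intro bitmap _ _
  unfold Spec_bitmap_to_level
  rw [portA_char, portB_char]
  have hb := rect_blank (bitmap.length * 2 + 1) (2 * (bitmap.length * 2 + 1) - 1)
  apply grid_ext (rect_applyW hb _) (rect_applyW hb _)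
  intro i hi j hj
  rw [cell_applyW hb (bounds_psA bitmap) i j, cell_applyW hb (bounds_psB bitmap) i j]
  by_cases hm : (i, j) ∈ psA bitmap
  · simp [hm, (mem_psA_iff_psB bitmap i j).mp hm]
  · rw [if_neg hm, if_neg (fun h => hm ((mem_psA_iff_psB bitmap i j).mpr h))]
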